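-- pv_equiv track=rewrite | github.com/callnoah2/MAS-Program4 | voting.py | ranked_choice_voting
-- ===== SOURCE A (Python) =====
-- def ranked_choice_voting(candidateRanking, ordered, voters, candidates):
--     eliminated_candidates = []
--     remaining_candidates = list(range(1, candidates + 1))
--
--     while len(remaining_candidates) > 1:
--         votes_count = [0] * candidates
--
--         for voter, preferences in zip(candidateRanking, ordered):
--             for preference in preferences:
--                 if preference in remaining_candidates:
--                     votes_count[preference - 1] += 1
--                     break
--
--         # Increment each valid candidate's count by 1
--         for i in range(len(votes_count)):
--             if i + 1 in remaining_candidates: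
--                 votes_count[i] += 1
--
--         # Find the candidate with the lowest non-zero votes
--         min_votes = min([count for count in votes_count if count > 0])
--         eliminated_candidate = votes_count.index(min_votes) + 1
--
--         eliminated_candidates.append(eliminated_candidate)
--         remaining_candidates.remove(eliminated_candidate)
--
--     winner = remaining_candidates[0]
--     return winner, eliminated_candidates
-- ===== SOURCE B (Python) =====
-- def ranked_choice_voting(candidateRanking, ordered, voters, candidates):
--     alive = [False] + [True] * max(candidates, 0)
--     # keep, per counted ballot, only in-range preferences; dead prefixes
--     # are dropped permanently, so each preference is skipped at most once
--     suffixes = [[p for p in prefs if 1 <= p <= candidates]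
--                 for _, prefs in zip(candidateRanking, ordered)]
--     eliminated = []
--     remaining = candidates
--     while remaining > 1:
--         tally = [0] * (candidates + 1)
--         active = []
--         for s in suffixes:
--             i = 0
--             while i < len(s) and not alive[s[i]]:
--                 i += 1
--             if i < len(s):
--                 s = s[i:]
--                 tally[s[0]] += 1
--                 active.append(s)
--         suffixes = active
--         loser = 1
--         for c in range(2, candidates + 1):
--             if alive[c] and (not alive[loser] or tally[c] < tally[loser]):
--                 loser = c
--         eliminated.append(loser)
--         alive[loser] = False
--         remaining -= 1
--     winner = alive.index(True)
--     return winner, eliminated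
-- ===== Notes on version B (the rewrite author's own statement) =====
-- stated objective: faster
-- what changed: Instead of recounting every ballot each round with linear membership scans over the remaining-candidates list, a +1 pass and votes_count.index, B keeps a boolean alive array and per-ballot preference suffixes restricted to in-range candidates, permanently drops dead prefixes (each preference is skipped at most once overall), tallies each active ballot's current head in one pass, and picks the loser by a single argmin scan over alive candidates.
import Mathlib
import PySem

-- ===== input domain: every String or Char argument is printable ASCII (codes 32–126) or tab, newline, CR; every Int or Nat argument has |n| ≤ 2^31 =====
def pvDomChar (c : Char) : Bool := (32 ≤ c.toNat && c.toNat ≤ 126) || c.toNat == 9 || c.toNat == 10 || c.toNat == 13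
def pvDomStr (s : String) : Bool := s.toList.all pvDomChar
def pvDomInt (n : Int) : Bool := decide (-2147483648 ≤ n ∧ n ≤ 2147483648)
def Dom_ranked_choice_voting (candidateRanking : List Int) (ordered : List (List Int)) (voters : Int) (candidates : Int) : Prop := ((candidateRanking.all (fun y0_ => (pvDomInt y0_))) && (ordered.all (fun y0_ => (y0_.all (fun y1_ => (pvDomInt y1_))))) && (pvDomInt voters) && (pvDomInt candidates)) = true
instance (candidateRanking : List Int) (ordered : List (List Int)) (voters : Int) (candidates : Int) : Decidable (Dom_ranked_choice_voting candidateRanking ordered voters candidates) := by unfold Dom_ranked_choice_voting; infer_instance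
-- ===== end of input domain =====

-- B replaces A's per-round full recount (with list-membership scans, a +1 pass and
-- votes_count.index) by an alive boolean array, per-ballot in-range preference suffixes whose
-- dead prefixes are dropped permanently, a one-pass head tally and a single argmin scan (faster).

-- ===== PORT A =====

-- 'xs[i] += 1' at a Nat index (both Pythons only ever bump an in-range index)
def pvBump : List Int → Nat → List Int
  | [], _ => []
  | x :: xs, 0 => (x + 1) :: xs
  | x :: xs, n + 1 => x :: pvBump xs n

-- 'for preference in preferences: if preference in remaining_candidates: votes_count[preference-1] += 1; break'
def pvABallot (remaining : List Int) : List Int → List Int → List Int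
  | [], vc => vc
  | p :: rest, vc => if p ∈ remaining then pvBump vc (p - 1).toNat else pvABallot remaining rest vc

-- 'for i in range(len(votes_count)): if i + 1 in remaining_candidates: votes_count[i] += 1'
-- (i carried as the candidate number i+1)
def pvAPlus1 (remaining : List Int) (i : Int) : List Int → List Int
  | [] => []
  | x :: xs => (if i ∈ remaining then x + 1 else x) :: pvAPlus1 remaining (i + 1) xs

-- one iteration of A's while-loop body: returns the eliminated candidate
def pvARound (pairs : List (Int × List Int)) (candidates : Int) (remaining : List Int) : Int :=
  let vc0 := List.replicate candidates.toNat (0 : Int)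
  let vc1 := pairs.foldl (fun vc pr => pvABallot remaining pr.2 vc) vc0
  let vc := pvAPlus1 remaining 1 vc1
  let mn := (PySem.List.min? (vc.filter (fun x => decide (0 < x))) (fun y => y)).getD 0
  (((PySem.List.index? vc mn).getD 0 : Nat) : Int) + 1

-- 'while len(remaining_candidates) > 1: …' (fuel = initial length; each iteration removes one)
def pvALoop (pairs : List (Int × List Int)) (candidates : Int) :
    Nat → List Int → List Int → List Int × List Int
  | 0, remaining, elim => (remaining, elim)
  | fuel + 1, remaining, elim =>
    if remaining.length ≤ 1 then (remaining, elim)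
    else
      pvALoop pairs candidates fuel
        ((PySem.List.remove? remaining (pvARound pairs candidates remaining)).getD remaining)
        (elim ++ [pvARound pairs candidates remaining])

def ranked_choice_voting (candidateRanking : List Int) (ordered : List (List Int)) (voters : Int) (candidates : Int) : Int × List Int :=
  ((pvALoop (candidateRanking.zip ordered) candidates
      (PySem.List.pyRange 1 (candidates + 1) 1).length
      (PySem.List.pyRange 1 (candidates + 1) 1) []).1.headD 0,
   (pvALoop (candidateRanking.zip ordered) candidates
      (PySem.List.pyRange 1 (candidates + 1) 1).length
      (PySem.List.pyRange 1 (candidates + 1) 1) []).2)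

-- ===== PORT B =====

-- 'i = 0; while i < len(s) and not alive[s[i]]: i += 1'  then  's = s[i:]'
def pvDropDead (alive : List Bool) : List Int → List Int
  | [] => []
  | p :: rest => if alive.getD p.toNat false then p :: rest else pvDropDead alive rest

-- 'for s in suffixes: …' building (tally, active)
def pvBCount (alive : List Bool) (candidates : Int) (suffixes : List (List Int)) :
    List Int × List (List Int) :=
  suffixes.foldl
    (fun st s =>
      match pvDropDead alive s with
      | [] => st
      | c :: rest => (pvBump st.1 c.toNat, st.2 ++ [c :: rest]))
    (List.replicate (candidates.toNat + 1) (0 : Int), [])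

-- 'loser = 1; for c in range(2, candidates+1): if alive[c] and (not alive[loser] or tally[c] < tally[loser]): loser = c'
def pvBLoser (alive : List Bool) (tally : List Int) (candidates : Int) : Int :=
  (PySem.List.pyRange 2 (candidates + 1) 1).foldl
    (fun loser c =>
      if alive.getD c.toNat false &&
         (!(alive.getD loser.toNat false) || decide (tally.getD c.toNat 0 < tally.getD loser.toNat 0))
      then c else loser) 1

-- 'while remaining > 1: …; remaining -= 1'   run as (candidates - 1).toNat rounds
def pvBLoop (candidates : Int) :
    Nat → List Bool → List (List Int) → List Int → List Bool × List Int
  | 0, alive, _, elim => (alive, elim)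
  | n + 1, alive, suffixes, elim =>
    pvBLoop candidates n
      (alive.set (pvBLoser alive (pvBCount alive candidates suffixes).1 candidates).toNat false)
      (pvBCount alive candidates suffixes).2
      (elim ++ [pvBLoser alive (pvBCount alive candidates suffixes).1 candidates])

def ranked_choice_voting_alt (candidateRanking : List Int) (ordered : List (List Int)) (voters : Int) (candidates : Int) : Int × List Int :=
  ((((PySem.List.index? (pvBLoop candidates (candidates - 1).toNat
        (false :: List.replicate candidates.toNat true)
        ((candidateRanking.zip ordered).map
          (fun pr => pr.2.filter (fun p => decide (1 ≤ p ∧ p ≤ candidates)))) []).1 true).getD 0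
      : Nat) : Int),
   (pvBLoop candidates (candidates - 1).toNat
        (false :: List.replicate candidates.toNat true)
        ((candidateRanking.zip ordered).map
          (fun pr => pr.2.filter (fun p => decide (1 ≤ p ∧ p ≤ candidates)))) []).2)

-- ===== PRECONDITION & SPEC =====
-- Pre_ excludes candidates < 1, where A raises (IndexError on remaining_candidates[0]); A returns on every input with candidates ≥ 1.
def Pre_ranked_choice_voting (candidateRanking : List Int) (ordered : List (List Int)) (voters : Int) (candidates : Int) : Prop := 1 ≤ candidates
instance (candidateRanking : List Int) (ordered : List (List Int)) (voters : Int) (candidates : Int) : Decidable (Pre_ranked_choice_voting candidateRanking ordered voters candidates) := by unfold Pre_ranked_choice_voting; infer_instance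
def pvWitness_ranked_choice_voting : List Int × List (List Int) × Int × Int :=
  ([10, 20, 30], [[1, 2, 3], [2, 1, 3], [2, 3, 1]], 3, 3)

def Spec_ranked_choice_voting (candidateRanking : List Int) (ordered : List (List Int)) (voters : Int) (candidates : Int) (out : Int × List Int) : Prop := out = ranked_choice_voting_alt candidateRanking ordered voters candidates
instance (candidateRanking : List Int) (ordered : List (List Int)) (voters : Int) (candidates : Int) (out : Int × List Int) : Decidable (Spec_ranked_choice_voting candidateRanking ordered voters candidates out) := by unfold Spec_ranked_choice_voting; infer_instance

-- ===== CLAIM (what is proved, stated in full; the proofs are below) =====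
def Claim_equal_ranked_choice_voting : Prop := ∀ (candidateRanking : List Int) (ordered : List (List Int)) (voters : Int) (candidates : Int), Dom_ranked_choice_voting candidateRanking ordered voters candidates → Pre_ranked_choice_voting candidateRanking ordered voters candidates → Spec_ranked_choice_voting candidateRanking ordered voters candidates (ranked_choice_voting candidateRanking ordered voters candidates)

-- ===== LEMMAS AND PROOFS =====
-- proof-side definitions
def pvChi (C : Int) (R : List Int) : List Bool :=
  false :: (List.range C.toNat).map (fun i : Nat => decide (((i : Int) + 1) ∈ R))

def pvM (pairs : List (Int × List Int)) (C : Int) : List (List Int) :=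
  pairs.map (fun pr => pr.2.filter (fun p => decide (1 ≤ p ∧ p ≤ C)))

def pvFP (R b : List Int) : Option Int := b.find? (fun p => decide (p ∈ R))

def pvTly (R : List Int) (pairs : List (Int × List Int)) (c : Int) : Nat :=
  pairs.countP (fun pr => pvFP R pr.2 == some c)

def pvIsLoser (R : List Int) (pairs : List (Int × List Int)) (l : Int) : Prop :=
  l ∈ R ∧ ∀ c ∈ R, pvTly R pairs l < pvTly R pairs c ∨ (pvTly R pairs l = pvTly R pairs c ∧ l ≤ c)

theorem pvIsLoser_unique {R : List Int} {pairs : List (Int × List Int)} {l1 l2 : Int}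
    (h1 : pvIsLoser R pairs l1) (h2 : pvIsLoser R pairs l2) : l1 = l2 := by
  obtain ⟨m1, p1⟩ := h1
  obtain ⟨m2, p2⟩ := h2
  rcases p1 l2 m2 with h | ⟨he, hle⟩ <;> rcases p2 l1 m1 with h' | ⟨he', hle'⟩ <;> omega

-- pvBump
theorem pvBump_length (l : List Int) (n : Nat) : (pvBump l n).length = l.length := by
  induction l generalizing n with
  | nil => rfl
  | cons x xs ih => cases n <;> simp [pvBump, ih]

theorem pvBump_getD (l : List Int) (n i : Nat) (hi : i < l.length) :
    (pvBump l n).getD i 0 = if i = n then l.getD i 0 + 1 else l.getD i 0 := by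
  induction l generalizing n i with
  | nil => simp at hi
  | cons x xs ih =>
    cases n with
    | zero =>
      cases i with
      | zero => simp [pvBump]
      | succ i => simp [pvBump]
    | succ n =>
      cases i with
      | zero => simp [pvBump]
      | succ i =>
        simp only [pvBump, List.getD_cons_succ]
        rw [ih n i (by simpa using hi)]
        by_cases h : i = n <;> simp [h]

-- pvABallot computes a bump at the first preference in R
theorem pvABallot_eq (R : List Int) (b vc : List Int) :
    pvABallot R b vc = match pvFP R b with
      | none => vc
      | some p => pvBump vc (p - 1).toNat := by
  induction b with
  | nil => rfl
  | cons p rest ih =>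
    by_cases h : p ∈ R <;> simp [pvABallot, pvFP, h] at ih ⊢
    · exact ih

theorem pvFP_mem {R b : List Int} {p : Int} (h : pvFP R b = some p) : p ∈ R := by
  have := List.find?_some h
  simpa using this

-- A's counting fold
theorem pvACount_length (R : List Int) (pairs : List (Int × List Int)) (vc : List Int)
    (hb : ∀ c ∈ R, 1 ≤ c ∧ c ≤ (vc.length : Int)) :
    (pairs.foldl (fun vc pr => pvABallot R pr.2 vc) vc).length = vc.length := by
  induction pairs generalizing vc with
  | nil => rfl
  | cons pr rest ih =>
    simp only [List.foldl_cons]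
    rw [ih, pvABallot_eq]
    · cases hfp : pvFP R pr.2 with
      | none => rfl
      | some p => rw [pvBump_length]
    · rw [pvABallot_eq]
      cases hfp : pvFP R pr.2 with
      | none => simpa using hb
      | some p => simpa [pvBump_length] using hb

theorem pvACount_getD (R : List Int) (pairs : List (Int × List Int)) (vc : List Int)
    (hb : ∀ c ∈ R, 1 ≤ c ∧ c ≤ (vc.length : Int)) (i : Nat) (hi : i < vc.length) :
    (pairs.foldl (fun vc pr => pvABallot R pr.2 vc) vc).getD i 0
      = vc.getD i 0 + (pvTly R pairs ((i : Int) + 1) : Int) := by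
  induction pairs generalizing vc with
  | nil => simp [pvTly]
  | cons pr rest ih =>
    simp only [List.foldl_cons]
    have hlen : (pvABallot R pr.2 vc).length = vc.length := by
      rw [pvABallot_eq]
      cases hfp : pvFP R pr.2 with
      | none => rfl
      | some p => rw [pvBump_length]
    rw [ih _ (by simpa [hlen] using hb) (by simpa [hlen] using hi)]
    rw [pvABallot_eq]
    cases hfp : pvFP R pr.2 with
    | none =>
      have : pvTly R (pr :: rest) ((i : Int) + 1) = pvTly R rest ((i : Int) + 1) := by
        simp [pvTly, hfp]
      rw [this]
    | some p =>
      have hpR := pvFP_mem hfp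
      have hpb := hb p hpR
      rw [pvBump_getD vc _ i hi]
      have hidx : (i = (p - 1).toNat) ↔ ((p : Int) = (i : Int) + 1) := by omega
      by_cases hc : (p : Int) = (i : Int) + 1
      · have : pvTly R (pr :: rest) ((i : Int) + 1) = pvTly R rest ((i : Int) + 1) + 1 := by
          simp [pvTly, hfp, hc]
        rw [this, if_pos (hidx.mpr hc)]
        push_cast
        ring
      · have : pvTly R (pr :: rest) ((i : Int) + 1) = pvTly R rest ((i : Int) + 1) := by
        
          simp [pvTly, hfp, hc]
        rw [this, if_neg (fun h => hc (hidx.mp h))]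

-- pvAPlus1
theorem pvAPlus1_length (R : List Int) (a : Int) (l : List Int) :
    (pvAPlus1 R a l).length = l.length := by
  induction l generalizing a with
  | nil => rfl
  | cons x xs ih => simp [pvAPlus1, ih]

theorem pvAPlus1_getD (R : List Int) (a : Int) (l : List Int) (i : Nat) (hi : i < l.length) :
    (pvAPlus1 R a l).getD i 0 = l.getD i 0 + (if (a + (i : Int)) ∈ R then 1 else 0) := by
  induction l generalizing a i with
  | nil => simp at hi
  | cons x xs ih =>
    cases i with
    | zero => by_cases h : a ∈ R <;> simp [pvAPlus1, h]
    | succ i =>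
      simp only [pvAPlus1, List.getD_cons_succ]
      rw [ih (a + 1) i (by simpa using hi)]
      have : a + 1 + (i : Int) = a + ((i : Int) + 1) := by ring
      rw [this]
      push_cast
      ring_nf

-- the fully built votes_count array of one A round
theorem pvVC_spec (R : List Int) (pairs : List (Int × List Int)) (C : Int) (hC : 1 ≤ C)
    (hb : ∀ c ∈ R, 1 ≤ c ∧ c ≤ C) :
    (pvAPlus1 R 1 ((pairs.foldl (fun vc pr => pvABallot R pr.2 vc)
        (List.replicate C.toNat (0 : Int))))).length = C.toNat ∧
    ∀ i : Nat, i < C.toNat →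
      (pvAPlus1 R 1 ((pairs.foldl (fun vc pr => pvABallot R pr.2 vc)
          (List.replicate C.toNat (0 : Int))))).getD i 0
        = (if ((i : Int) + 1) ∈ R then 1 else 0) + (pvTly R pairs ((i : Int) + 1) : Int) := by
  have hb' : ∀ c ∈ R, 1 ≤ c ∧ c ≤ ((List.replicate C.toNat (0 : Int)).length : Int) := by
    intro c hc
    have := hb c hc
    simp only [List.length_replicate]
    omega
  have hlen := pvACount_length R pairs (List.replicate C.toNat (0 : Int)) hb'
  constructor
  · rw [pvAPlus1_length, hlen, List.length_replicate]
  · intro i hi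
    have hi' : i < (List.replicate C.toNat (0 : Int)).length := by simpa using hi
    rw [pvAPlus1_getD _ _ _ i (by rw [hlen]; simpa using hi)]
    rw [pvACount_getD R pairs _ hb' i hi']
    have : (1 : Int) + (i : Int) = (i : Int) + 1 := by ring
    rw [this]
    simp
    ring

theorem pvTly_eq_zero_of_not_mem (R : List Int) (pairs : List (Int × List Int)) {c : Int}
    (hc : c ∉ R) : pvTly R pairs c = 0 := by
  rw [pvTly, List.countP_eq_zero]
  intro pr _ h
  simp only [beq_iff_eq] at h
  exact hc (pvFP_mem h)

theorem pvARound_isLoser (pairs : List (Int × List Int)) (C : Int) (R : List Int)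
    (hC : 1 ≤ C) (hb : ∀ c ∈ R, 1 ≤ c ∧ c ≤ C) (hne : R ≠ []) :
    pvIsLoser R pairs (pvARound pairs C R) := by
  obtain ⟨hlen, hval⟩ := pvVC_spec R pairs C hC hb
  set vc := pvAPlus1 R 1 ((pairs.foldl (fun vc pr => pvABallot R pr.2 vc)
      (List.replicate C.toNat (0 : Int)))) with hvc
  -- basic index facts
  have hidx : ∀ c ∈ R, (c - 1).toNat < C.toNat ∧ (((c - 1).toNat : Int) + 1) = c := by
    intro c hc
    have := hb c hc
    omega
  have hmemvc : ∀ c ∈ R, vc.getD (c - 1).toNat 0 = 1 + (pvTly R pairs c : Int) := by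
    intro c hc
    obtain ⟨h1, h2⟩ := hidx c hc
    rw [hval _ h1, h2, if_pos hc]
  have hpos_mem : ∀ i : Nat, i < C.toNat → 0 < vc.getD i 0 → ((i : Int) + 1) ∈ R := by
    intro i hi hp
    by_contra hnm
    rw [hval i hi, if_neg hnm, pvTly_eq_zero_of_not_mem R pairs hnm] at hp
    simp at hp
  -- the filtered list is nonempty
  obtain ⟨c0, hc0⟩ := List.exists_mem_of_ne_nil R hne
  have hfiltmem : ∀ c ∈ R, vc.getD (c - 1).toNat 0 ∈ vc.filter (fun x => decide (0 < x)) := by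
    intro c hc
    obtain ⟨h1, _⟩ := hidx c hc
    have hiv : (c - 1).toNat < vc.length := by omega
    rw [List.mem_filter]
    constructor
    · rw [List.getD_eq_getElem vc 0 hiv]
      exact List.getElem_mem hiv
    · rw [hmemvc c hc]
      simp
      omega
  have hfne : vc.filter (fun x => decide (0 < x)) ≠ [] := by
    intro h
    have := hfiltmem c0 hc0
    rw [h] at this
    simp at this
  obtain ⟨m, hm⟩ : ∃ m, PySem.List.min? (vc.filter (fun x => decide (0 < x))) (fun y => y) = some m := by
    cases h : PySem.List.min? (vc.filter (fun x => decide (0 < x))) (fun y => y) with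
    | none => exact absurd ((PySem.List.min?_eq_none_iff _ _).mp h) hfne
    | some m => exact ⟨m, rfl⟩
  have hmmem := PySem.List.min?_mem hm
  rw [List.mem_filter] at hmmem
  obtain ⟨hmvc, hmpos'⟩ := hmmem
  have hmpos : 0 < m := by simpa using hmpos'
  have hmin : ∀ y ∈ vc.filter (fun x => decide (0 < x)), m ≤ y := by
    intro y hy
    exact PySem.List.min?_isMin hm y hy
  obtain ⟨k, hk⟩ : ∃ k, PySem.List.index? vc m = some k :=
    Option.isSome_iff_exists.mp ((PySem.List.index?_isSome_iff _ _).mpr hmvc)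
  obtain ⟨hklt, hvk, hprior⟩ := PySem.List.getElem_of_index?_eq_some hk
  have hkC : k < C.toNat := by omega
  have hgk : vc.getD k 0 = m := by rw [List.getD_eq_getElem vc 0 hklt]; exact hvk
  -- the eliminated candidate
  have heR : ((k : Int) + 1) ∈ R := hpos_mem k hkC (by rw [hgk]; exact hmpos)
  have hme : m = 1 + (pvTly R pairs ((k : Int) + 1) : Int) := by
    have := hmemvc _ heR
    have hsimp : (((k : Int) + 1) - 1).toNat = k := by omega
    rw [hsimp] at this
    rw [← hgk, this]
  have hres : pvARound pairs C R = (k : Int) + 1 := by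
    rw [pvARound]
    rw [← hvc]
    simp only [hm, Option.getD_some, hk]
  rw [hres]
  refine ⟨heR, ?_⟩
  intro c hc
  have hle : pvTly R pairs ((k : Int) + 1) ≤ pvTly R pairs c := by
    have := hmin _ (hfiltmem c hc)
    rw [hmemvc c hc] at this
    omega
  rcases Nat.lt_or_ge (pvTly R pairs ((k : Int) + 1)) (pvTly R pairs c) with h | h
  · exact Or.inl h
  · right
    have heq : pvTly R pairs ((k : Int) + 1) = pvTly R pairs c := by omega
    refine ⟨heq, ?_⟩
    by_contra hlt
    push_neg at hlt
    obtain ⟨hcb1, hcb2⟩ := hb c hc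
    have hj : (c - 1).toNat < k := by omega
    have := hprior (c - 1).toNat hj
    apply this
    rw [← List.getD_eq_getElem vc 0 (by omega), hmemvc c hc, hme, heq]

-- pvDropDead
theorem pvDropDead_cons (A : List Bool) (p : Int) (rest : List Int) :
    pvDropDead A (p :: rest)
      = if A.getD p.toNat false = true then p :: rest else pvDropDead A rest := by
  simp [pvDropDead]

theorem pvDropDead_comp {A' A : List Bool}
    (h : ∀ i, A'.getD i false = true → A.getD i false = true) (s : List Int) :
    pvDropDead A' (pvDropDead A s) = pvDropDead A' s := by
  induction s with
  | nil => rfl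
  | cons p rest ih =>
    by_cases hA : A.getD p.toNat false = true
    · rw [pvDropDead_cons, if_pos hA]
    · have hA' : ¬ (A'.getD p.toNat false = true) := fun hx => hA (h _ hx)
      rw [pvDropDead_cons, if_neg hA, pvDropDead_cons, if_neg hA', ih]

theorem pvDropDead_subset {A : List Bool} {s : List Int} {p : Int}
    (h : p ∈ pvDropDead A s) : p ∈ s := by
  induction s with
  | nil => simpa [pvDropDead] using h
  | cons q rest ih =>
    rw [pvDropDead_cons] at h
    by_cases hA : A.getD q.toNat false = true
    · rw [if_pos hA] at h
      exact h
    · rw [if_neg hA] at h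
      exact List.mem_cons_of_mem _ (ih h)

-- pvChi lookup
theorem pvChi_getD (C : Int) (R : List Int) (c : Int) (h1 : 1 ≤ c) (h2 : c ≤ C) :
    (pvChi C R).getD c.toNat false = decide (c ∈ R) := by
  have hn : c.toNat = (c.toNat - 1) + 1 := by omega
  have hlt : c.toNat - 1 < C.toNat := by omega
  rw [pvChi, List.getD_eq_getElem?_getD, hn, List.getElem?_cons_succ, List.getElem?_map,
      List.getElem?_range hlt]
  simp only [Option.map_some, Option.getD_some]
  have hc : ((c.toNat - 1 : Nat) : Int) + 1 = c := by omega
  rw [hc]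

theorem pvChi_getD_true {C : Int} {R : List Int} {i : Nat}
    (h : (pvChi C R).getD i false = true) : 1 ≤ (i : Int) ∧ (i : Int) ≤ C ∧ (i : Int) ∈ R := by
  rw [pvChi, List.getD_eq_getElem?_getD] at h
  cases i with
  | zero => simp at h
  | succ j =>
    rw [List.getElem?_cons_succ, List.getElem?_map] at h
    by_cases hj : j < C.toNat
    · rw [List.getElem?_range hj] at h
      simp only [Option.map_some, Option.getD_some, decide_eq_true_eq] at h
      refine ⟨by omega, by omega, ?_⟩
      have hc : ((j : Int) + 1) = ((j + 1 : Nat) : Int) := by push_cast; ring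
      rw [← hc]
      exact h
    · rw [List.getElem?_eq_none (by simpa using (by omega : C.toNat ≤ j))] at h
      simp at h

-- first preference = head of the dropped filtered suffix
theorem pvFP_eq_head (C : Int) (R : List Int) (hb : ∀ c ∈ R, 1 ≤ c ∧ c ≤ C) (b : List Int) :
    pvFP R b = (pvDropDead (pvChi C R) (b.filter (fun p => decide (1 ≤ p ∧ p ≤ C)))).head? := by
  induction b with
  | nil => rfl
  | cons p rest ih =>
    by_cases hin : 1 ≤ p ∧ p ≤ C
    · by_cases hR : p ∈ R
      · have hg : (pvChi C R).getD p.toNat false = true := by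
          rw [pvChi_getD C R p hin.1 hin.2]; simpa using hR
        rw [pvFP, List.find?_cons_of_pos (by simpa using hR),
            List.filter_cons_of_pos (by simpa using hin), pvDropDead_cons, if_pos hg]
        rfl
      · have hg : ¬ ((pvChi C R).getD p.toNat false = true) := by
          rw [pvChi_getD C R p hin.1 hin.2]; simpa using hR
        rw [pvFP, List.find?_cons_of_neg (by simpa using hR),
            List.filter_cons_of_pos (by simpa using hin), pvDropDead_cons, if_neg hg]
        exact ih
    · have hR : p ∉ R := fun h => hin (hb p h)
      rw [pvFP, List.find?_cons_of_neg (by simpa using hR),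
          List.filter_cons_of_neg (by simpa using hin)]
      exact ih

-- pvBCount splits into a tally fold and the active-suffix list
theorem pvBCount_foldl (A : List Bool) (S : List (List Int)) (t : List Int) (a : List (List Int)) :
    S.foldl (fun st s => match pvDropDead A s with
        | [] => st
        | c :: rest => (pvBump st.1 c.toNat, st.2 ++ [c :: rest])) (t, a)
      = (S.foldl (fun t s => match pvDropDead A s with
            | [] => t
            | c :: _ => pvBump t c.toNat) t,
         a ++ (S.map (pvDropDead A)).filter (fun s => !s.isEmpty)) := by
  induction S generalizing t a with
  | nil => simp
  | cons s S ih =>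
    simp only [List.foldl_cons, List.map_cons, List.filter_cons]
    cases hd : pvDropDead A s with
    | nil => simpa using ih t a
    | cons c rest => simpa using ih (pvBump t c.toNat) (a ++ [c :: rest])

theorem pvBTally_getD (A : List Bool) (C : Int) (S : List (List Int))
    (helem : ∀ s ∈ S, ∀ p ∈ s, 1 ≤ p ∧ p ≤ C) (t : List Int) (ht : t.length = C.toNat + 1)
    (c : Int) (hc1 : 1 ≤ c) (hc2 : c ≤ C) :
    (S.foldl (fun t s => match pvDropDead A s with
        | [] => t
        | c :: _ => pvBump t c.toNat) t).getD c.toNat 0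
      = t.getD c.toNat 0 + (S.countP (fun s => (pvDropDead A s).head? == some c) : Int) := by
  induction S generalizing t with
  | nil => simp
  | cons s S ih =>
    simp only [List.foldl_cons]
    cases hd : pvDropDead A s with
    | nil =>
      rw [ih (fun s hs => helem s (List.mem_cons_of_mem _ hs)) t ht]
      have : (S.countP (fun s => (pvDropDead A s).head? == some c))
          = ((s :: S).countP (fun s => (pvDropDead A s).head? == some c)) := by
        simp [hd]
      rw [this]
    | cons q rest =>
      have hq : q ∈ s := pvDropDead_subset (by rw [hd]; exact List.mem_cons_self)
      have hqb := helem s List.mem_cons_self q hq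
      rw [ih (fun s hs => helem s (List.mem_cons_of_mem _ hs)) (pvBump t q.toNat)
          (by rw [pvBump_length]; exact ht)]
      rw [pvBump_getD t q.toNat c.toNat (by omega)]
      by_cases hqc : q = c
      · rw [if_pos (by rw [hqc])]
        have : ((s :: S).countP (fun s => (pvDropDead A s).head? == some c))
            = (S.countP (fun s => (pvDropDead A s).head? == some c)) + 1 := by
          simp [hd, hqc]
        rw [this]
        push_cast
        ring
      · rw [if_neg (by omega)]
        have : ((s :: S).countP (fun s => (pvDropDead A s).head? == some c))
            = (S.countP (fun s => (pvDropDead A s).head? == some c)) := by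
          simp [hd, hqc]
        rw [this]

-- pvBCount only sees each suffix through its first still-alive preference
theorem pvBCount_congr_fold (A' A0 : List Bool) (S : List (List Int))
    (h : ∀ i, A'.getD i false = true → A0.getD i false = true)
    (st : List Int × List (List Int)) :
    ((S.map (pvDropDead A0)).filter (fun s => !s.isEmpty)).foldl
        (fun st s => match pvDropDead A' s with
          | [] => st
          | c :: rest => (pvBump st.1 c.toNat, st.2 ++ [c :: rest])) st
      = S.foldl
        (fun st s => match pvDropDead A' s with
          | [] => st
          | c :: rest => (pvBump st.1 c.toNat, st.2 ++ [c :: rest])) st := by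
  induction S generalizing st with
  | nil => rfl
  | cons s S ih =>
    simp only [List.map_cons, List.filter_cons]
    cases hd : pvDropDead A0 s with
    | nil =>
      have hdd : pvDropDead A' s = [] := by
        rw [← pvDropDead_comp h s, hd]
        rfl
      simp only [List.isEmpty_nil, Bool.not_true, if_neg (by simp : ¬ (false = true)),
        List.foldl_cons, hdd]
      exact ih st
    | cons q rest =>
      have hdd : pvDropDead A' (q :: rest) = pvDropDead A' s := by
        rw [← hd, pvDropDead_comp h s]
      simp only [List.isEmpty_cons, Bool.not_false, ite_true, List.foldl_cons]
      rw [hdd]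
      exact ih _

theorem pvBCount_congr (A' A0 : List Bool) (C : Int) (S : List (List Int))
    (h : ∀ i, A'.getD i false = true → A0.getD i false = true) :
    pvBCount A' C ((S.map (pvDropDead A0)).filter (fun s => !s.isEmpty)) = pvBCount A' C S := by
  rw [pvBCount, pvBCount, pvBCount_congr_fold A' A0 S h]

-- tally of the canonical suffix list = A's per-candidate vote count
theorem pvCountP_M_eq_tly (pairs : List (Int × List Int)) (C : Int) (R : List Int)
    (hb : ∀ c ∈ R, 1 ≤ c ∧ c ≤ C) (c : Int) :
    (pvM pairs C).countP (fun s => (pvDropDead (pvChi C R) s).head? == some c)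
      = pvTly R pairs c := by
  rw [pvM, List.countP_map, pvTly]
  apply List.countP_congr
  intro pr _
  simp only [Function.comp]
  rw [← pvFP_eq_head C R hb pr.2]

-- the argmin scan of B
theorem pvBLoser_inv (A : List Bool) (T : List Int) (k : Int) (hk : 1 ≤ k) :
    (1 ≤ (PySem.List.pyRange 2 (k + 1) 1).foldl
        (fun loser c =>
          if A.getD c.toNat false &&
             (!(A.getD loser.toNat false) ||
              decide (T.getD c.toNat 0 < T.getD loser.toNat 0))
          then c else loser) 1 ∧
      (PySem.List.pyRange 2 (k + 1) 1).foldl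
        (fun loser c =>
          if A.getD c.toNat false &&
             (!(A.getD loser.toNat false) ||
              decide (T.getD c.toNat 0 < T.getD loser.toNat 0))
          then c else loser) 1 ≤ k) ∧
    (A.getD ((PySem.List.pyRange 2 (k + 1) 1).foldl
        (fun loser c =>
          if A.getD c.toNat false &&
             (!(A.getD loser.toNat false) ||
              decide (T.getD c.toNat 0 < T.getD loser.toNat 0))
          then c else loser) 1).toNat false = false →
      ∀ c : Int, 1 ≤ c → c ≤ k → A.getD c.toNat false = false) ∧
    (A.getD ((PySem.List.pyRange 2 (k + 1) 1).foldl
        (fun loser c =>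
          if A.getD c.toNat false &&
             (!(A.getD loser.toNat false) ||
              decide (T.getD c.toNat 0 < T.getD loser.toNat 0))
          then c else loser) 1).toNat false = true →
      ∀ c : Int, 1 ≤ c → c ≤ k → A.getD c.toNat false = true →
        (T.getD ((PySem.List.pyRange 2 (k + 1) 1).foldl
            (fun loser c =>
              if A.getD c.toNat false &&
                 (!(A.getD loser.toNat false) ||
                  decide (T.getD c.toNat 0 < T.getD loser.toNat 0))
              then c else loser) 1).toNat 0 < T.getD c.toNat 0 ∨
         (T.getD ((PySem.List.pyRange 2 (k + 1) 1).foldl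
            (fun loser c =>
              if A.getD c.toNat false &&
                 (!(A.getD loser.toNat false) ||
                  decide (T.getD c.toNat 0 < T.getD loser.toNat 0))
              then c else loser) 1).toNat 0 = T.getD c.toNat 0 ∧
          (PySem.List.pyRange 2 (k + 1) 1).foldl
            (fun loser c =>
              if A.getD c.toNat false &&
                 (!(A.getD loser.toNat false) ||
                  decide (T.getD c.toNat 0 < T.getD loser.toNat 0))
              then c else loser) 1 ≤ c))) := by
  induction k, hk using Int.le_induction with
  | base =>
    rw [PySem.List.pyRange_one_eq_nil (by omega)]
    simp only [List.foldl_nil]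
    refine ⟨⟨le_refl 1, le_refl 1⟩, ?_, ?_⟩
    · intro h1 c hc1 hc2
      have : c = 1 := by omega
      rw [this]; exact h1
    · intro h1 c hc1 hc2 _
      right
      have : c = 1 := by omega
      rw [this]
      exact ⟨rfl, le_refl 1⟩
  | succ k hk ih =>
    obtain ⟨⟨hl1, hlk⟩, hdead, halive⟩ := ih
    rw [show k + 1 + 1 = (k + 1) + 1 by ring, PySem.List.pyRange_one_succ_right (by omega),
        List.foldl_append, List.foldl_cons, List.foldl_nil]
    set l := (PySem.List.pyRange 2 (k + 1) 1).foldl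
        (fun loser c =>
          if A.getD c.toNat false &&
             (!(A.getD loser.toNat false) ||
              decide (T.getD c.toNat 0 < T.getD loser.toNat 0))
          then c else loser) 1 with hl
    by_cases hcnd : (A.getD (k + 1).toNat false &&
        (!(A.getD l.toNat false) || decide (T.getD (k + 1).toNat 0 < T.getD l.toNat 0))) = true
    · rw [if_pos hcnd]
      simp only [Bool.and_eq_true, Bool.or_eq_true, Bool.not_eq_true', decide_eq_true_eq] at hcnd
      obtain ⟨hak1, hrest⟩ := hcnd
      refine ⟨⟨by omega, le_refl _⟩, ?_, ?_⟩
      · intro hcontra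
        rw [hak1] at hcontra
        exact absurd hcontra (by simp)
      · intro _ c hc1 hc2 hac
        by_cases hck : c ≤ k
        · -- c is among the earlier candidates
          by_cases hld : A.getD l.toNat false = true
          · left
            have hlt : T.getD (k + 1).toNat 0 < T.getD l.toNat 0 := by
              rcases hrest with hldead | hlt
              · rw [hld] at hldead; exact absurd hldead (by simp)
              · exact hlt
            rcases halive hld c hc1 hck hac with h | ⟨he, _⟩ <;> omega
          · have hdd : A.getD l.toNat false = false := by
              cases hx : A.getD l.toNat false with
              | false => rfl
              | true => exact absurd hx hld
            rw [hdead hdd c hc1 hck] at hac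
            exact absurd hac (by simp)
        · have : c = k + 1 := by omega
          rw [this]
          exact Or.inr ⟨rfl, le_refl _⟩
    · rw [if_neg hcnd]
      simp only [Bool.and_eq_true, Bool.or_eq_true, Bool.not_eq_true', decide_eq_true_eq,
        not_and, not_or, not_lt, Bool.not_eq_false] at hcnd
      refine ⟨⟨hl1, by omega⟩, ?_, ?_⟩
      · intro hldead c hc1 hc2
        by_cases hck : c ≤ k
        · exact hdead hldead c hc1 hck
        · have hc : c = k + 1 := by omega
          cases hx : A.getD (k + 1).toNat false with
          | false => rw [hc]; exact hx
          | true =>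
            obtain ⟨h1, h2⟩ := hcnd hx
            rw [h1] at hldead
            exact absurd hldead (by simp)
      · intro hlal c hc1 hc2 hac
        by_cases hck : c ≤ k
        · exact halive hlal c hc1 hck hac
        · have hc : c = k + 1 := by omega
          obtain ⟨_, h2⟩ := hcnd (by rw [← hc]; exact hac)
          rw [hc]
          rcases lt_or_eq_of_le h2 with h | h
          · exact Or.inl h
          · exact Or.inr ⟨h, by omega⟩

theorem pvBLoser_isLoser (pairs : List (Int × List Int)) (C : Int) (R : List Int) (T : List Int)
    (hC : 1 ≤ C) (hb : ∀ c ∈ R, 1 ≤ c ∧ c ≤ C) (hne : R ≠ [])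
    (hT : ∀ c : Int, 1 ≤ c → c ≤ C → T.getD c.toNat 0 = (pvTly R pairs c : Int)) :
    pvIsLoser R pairs (pvBLoser (pvChi C R) T C) := by
  obtain ⟨⟨hl1, hlk⟩, hdead, halive⟩ := pvBLoser_inv (pvChi C R) T C hC
  rw [pvBLoser]
  set l := (PySem.List.pyRange 2 (C + 1) 1).foldl
      (fun loser c =>
        if (pvChi C R).getD c.toNat false &&
           (!((pvChi C R).getD loser.toNat false) ||
            decide (T.getD c.toNat 0 < T.getD loser.toNat 0))
        then c else loser) 1 with hl
  obtain ⟨c0, hc0⟩ := List.exists_mem_of_ne_nil R hne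
  obtain ⟨hc01, hc02⟩ := hb c0 hc0
  have hc0alive : (pvChi C R).getD c0.toNat false = true := by
    rw [pvChi_getD C R c0 hc01 hc02]; simpa using hc0
  have hal : (pvChi C R).getD l.toNat false = true := by
    cases hx : (pvChi C R).getD l.toNat false with
    | true => rfl
    | false => rw [hdead hx c0 hc01 hc02] at hc0alive; exact absurd hc0alive (by simp)
  obtain ⟨hl1', hlC', hlR'⟩ := pvChi_getD_true hal
  have hltoNat : ((l.toNat : Nat) : Int) = l := by omega
  rw [hltoNat] at hlR'
  refine ⟨hlR', ?_⟩
  intro c hc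
  obtain ⟨hcb1, hcb2⟩ := hb c hc
  have hcalive : (pvChi C R).getD c.toNat false = true := by
    rw [pvChi_getD C R c hcb1 hcb2]; simpa using hc
  have := halive hal c hcb1 hcb2 hcalive
  rw [hT c hcb1 hcb2, hT l (by omega) (by omega)] at this
  rcases this with h | ⟨he, hle⟩
  · left; omega
  · right; exact ⟨by omega, hle⟩

-- tally list of a B round on the canonical suffix list
theorem pvBCount_fst_getD (pairs : List (Int × List Int)) (C : Int) (R : List Int)
    (hC : 1 ≤ C) (hb : ∀ c ∈ R, 1 ≤ c ∧ c ≤ C) (c : Int) (hc1 : 1 ≤ c) (hc2 : c ≤ C) :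
    ((pvBCount (pvChi C R) C (pvM pairs C)).1).getD c.toNat 0 = (pvTly R pairs c : Int) := by
  rw [pvBCount, pvBCount_foldl]
  have helem : ∀ s ∈ pvM pairs C, ∀ p ∈ s, 1 ≤ p ∧ p ≤ C := by
    intro s hs p hp
    rw [pvM] at hs
    obtain ⟨pr, _, rfl⟩ := List.mem_map.mp hs
    have := List.of_mem_filter hp
    simpa using this
  rw [pvBTally_getD (pvChi C R) C (pvM pairs C) helem _ (by simp) c hc1 hc2]
  have hrep : (List.replicate (C.toNat + 1) (0 : Int)).getD c.toNat 0 = 0 :=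
    List.getD_replicate 0 (by omega)
  rw [hrep]
  rw [pvCountP_M_eq_tly pairs C R hb c]
  ring

-- marking the loser dead = the characteristic vector of the erased list
theorem pvChi_set_erase (C : Int) (R : List Int) (e : Int) (hnd : R.Nodup)
    (h1 : 1 ≤ e) (h2 : e ≤ C) :
    (pvChi C R).set e.toNat false = pvChi C (R.erase e) := by
  apply List.ext_getElem
  · simp [pvChi]
  · intro i hi1 hi2
    rw [List.getElem_set]
    simp only [pvChi, List.length_cons, List.length_map, List.length_range] at hi2
    cases i with
    | zero =>
      rw [if_neg (by omega)]
      rfl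
    | succ j =>
      simp only [pvChi, List.getElem_cons_succ, List.getElem_map, List.getElem_range]
      by_cases hje : e.toNat = j + 1
      · rw [if_pos hje]
        have he : ((j : Int) + 1) = e := by omega
        rw [he]
        simp [List.Nodup.not_mem_erase hnd]
      · rw [if_neg hje]
        have hne' : (j : Int) + 1 ≠ e := by omega
        simp [List.Nodup.mem_erase_iff hnd, hne']

-- chi is monotone under ⊆
theorem pvChi_mono (C : Int) (R' R : List Int) (hsub : ∀ c, c ∈ R' → c ∈ R) :
    ∀ i, (pvChi C R').getD i false = true → (pvChi C R).getD i false = true := by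
  intro i h
  obtain ⟨h1, h2, h3⟩ := pvChi_getD_true h
  have : ((i : Int)).toNat = i := by omega
  rw [← this, pvChi_getD C R _ h1 h2]
  simpa using hsub _ h3

-- the winner is read off the alive array
theorem pvIndex?_of_unique (l : List Bool) (k : Nat) (hk : k < l.length) (ht : l[k] = true)
    (hprev : ∀ j, j < k → l[j]? = some false) : PySem.List.index? l true = some k := by
  induction l generalizing k with
  | nil => simp at hk
  | cons b t ih =>
    cases k with
    | zero =>
      simp at ht
      rw [ht]
      exact PySem.List.index?_cons_self true t
    | succ k =>
      have hb : b = false := by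
        have := hprev 0 (by omega)
        simpa using this
      rw [hb, PySem.List.index?_cons_of_ne t (by simp)]
      rw [ih k (by simpa using hk) (by simpa using ht)
          (fun j hj => by simpa using hprev (j + 1) (by omega))]
      rfl

theorem pvWinner_eq (C : Int) (w : Int) (h1 : 1 ≤ w) (h2 : w ≤ C) :
    PySem.List.index? (pvChi C [w]) true = some w.toNat := by
  have hwlen : w.toNat < (pvChi C [w]).length := by
    simp only [pvChi, List.length_cons, List.length_map, List.length_range]
    omega
  refine pvIndex?_of_unique (pvChi C [w]) w.toNat hwlen ?_ ?_
  · rw [← List.getD_eq_getElem _ false hwlen, pvChi_getD C [w] w h1 h2]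
    simp
  · intro j hj
    have hjlen : j < (pvChi C [w]).length := by
      simp only [pvChi, List.length_cons, List.length_map, List.length_range]
      omega
    have hval : (pvChi C [w])[j] = false := by
      rw [← List.getD_eq_getElem _ false hjlen]
      cases j with
      | zero => rfl
      | succ i =>
        have hcast : (i + 1 : Nat) = ((i : Int) + 1).toNat := by omega
        rw [hcast, pvChi_getD C [w] ((i : Int) + 1) (by omega) (by omega)]
        simp only [List.mem_singleton, decide_eq_false_iff_not]
        omega
    rw [List.getElem?_eq_getElem hjlen, hval]

-- the two main loops agree round for round
theorem pvLoop_eq (pairs : List (Int × List Int)) (C : Int) (hC : 1 ≤ C) :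
    ∀ (n : Nat) (R : List Int) (S : List (List Int)) (elim : List Int) (fuel : Nat),
      R.Nodup → (∀ c ∈ R, 1 ≤ c ∧ c ≤ C) → R.length = n + 1 → n ≤ fuel →
      (∀ A' : List Bool, (∀ i, A'.getD i false = true → (pvChi C R).getD i false = true) →
        pvBCount A' C S = pvBCount A' C (pvM pairs C)) →
      (pvALoop pairs C fuel R elim).1.headD 0
          = (((PySem.List.index? (pvBLoop C n (pvChi C R) S elim).1 true).getD 0 : Nat) : Int)
        ∧ (pvALoop pairs C fuel R elim).2 = (pvBLoop C n (pvChi C R) S elim).2 := by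
  intro n
  induction n with
  | zero =>
    intro R S elim fuel hnd hb hlen _ _
    obtain ⟨w, rfl⟩ : ∃ w, R = [w] := by
      cases R with
      | nil => simp at hlen
      | cons w t =>
        cases t with
        | nil => exact ⟨w, rfl⟩
        | cons _ _ => simp at hlen
    obtain ⟨hw1, hw2⟩ := hb w (List.mem_singleton_self w)
    have hA : pvALoop pairs C fuel [w] elim = ([w], elim) := by
      cases fuel with
      | zero => rfl
      | succ f => rw [pvALoop, if_pos (by simp)]
    have hB : pvBLoop C 0 (pvChi C [w]) S elim = (pvChi C [w], elim) := rfl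
    rw [hA, hB]
    refine ⟨?_, rfl⟩
    rw [pvWinner_eq C w hw1 hw2]
    simp only [Option.getD_some, List.headD_cons]
    omega
  | succ n ih =>
    intro R S elim fuel hnd hb hlen hfuel hS
    obtain ⟨f, rfl⟩ : ∃ f, fuel = f + 1 := ⟨fuel - 1, by omega⟩
    have hne : R ≠ [] := by intro h; rw [h] at hlen; simp at hlen
    have hcount : pvBCount (pvChi C R) C S = pvBCount (pvChi C R) C (pvM pairs C) :=
      hS (pvChi C R) (fun i h => h)
    have hT : ∀ c : Int, 1 ≤ c → c ≤ C →
        ((pvBCount (pvChi C R) C S).1).getD c.toNat 0 = (pvTly R pairs c : Int) := by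
      intro c h1 h2
      rw [hcount]
      exact pvBCount_fst_getD pairs C R hC hb c h1 h2
    have hloser : pvBLoser (pvChi C R) (pvBCount (pvChi C R) C S).1 C = pvARound pairs C R :=
      (pvIsLoser_unique (pvARound_isLoser pairs C R hC hb hne)
        (pvBLoser_isLoser pairs C R _ hC hb hne hT)).symm
    set e := pvARound pairs C R with he
    obtain ⟨heR, -⟩ := pvARound_isLoser pairs C R hC hb hne
    obtain ⟨he1, he2⟩ := hb e heR
    -- unfold one round on each side
    have hstepA : pvALoop pairs C (f + 1) R elim
        = pvALoop pairs C f (R.erase e) (elim ++ [e]) := by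
      rw [pvALoop, if_neg (by omega)]
      rw [PySem.List.remove?_eq_some_erase R e heR]
      rfl
    have hstepB : pvBLoop C (n + 1) (pvChi C R) S elim
        = pvBLoop C n (pvChi C (R.erase e)) ((pvBCount (pvChi C R) C S).2) (elim ++ [e]) := by
      rw [pvBLoop]
      rw [hloser, ← pvChi_set_erase C R e hnd he1 he2]
    rw [hstepA, hstepB]
    -- re-establish the invariant for the erased list
    have hact : (pvBCount (pvChi C R) C S).2
        = ((pvM pairs C).map (pvDropDead (pvChi C R))).filter (fun s => !s.isEmpty) := by
      rw [hcount, pvBCount, pvBCount_foldl]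
      simp
    have hS' : ∀ A' : List Bool,
        (∀ i, A'.getD i false = true → (pvChi C (R.erase e)).getD i false = true) →
        pvBCount A' C ((pvBCount (pvChi C R) C S).2) = pvBCount A' C (pvM pairs C) := by
      intro A' hsub
      rw [hact]
      exact pvBCount_congr A' (pvChi C R) C (pvM pairs C)
        (fun i h => pvChi_mono C (R.erase e) R (fun c hc => List.mem_of_mem_erase hc) i (hsub i h))
    exact ih (R.erase e) _ (elim ++ [e]) f (hnd.erase e)
      (fun c hc => hb c (List.mem_of_mem_erase hc))
      (by rw [List.length_erase_of_mem heR]; omega) (by omega) hS'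

-- the initial alive array is the characteristic vector of range(1, candidates+1)
theorem pvChi_init (C : Int) :
    pvChi C (PySem.List.pyRange 1 (C + 1) 1) = false :: List.replicate C.toNat true := by
  rw [pvChi]
  congr 1
  apply List.eq_replicate_iff.mpr
  refine ⟨by simp, ?_⟩
  intro b hbmem
  obtain ⟨i, hi, rfl⟩ := List.mem_map.mp hbmem
  rw [List.mem_range] at hi
  simp only [decide_eq_true_eq, PySem.List.mem_pyRange_one]
  omega

theorem pv_main (candidateRanking : List Int) (ordered : List (List Int)) (voters : Int)
    (candidates : Int) (hC : 1 ≤ candidates) :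
    ranked_choice_voting candidateRanking ordered voters candidates
      = ranked_choice_voting_alt candidateRanking ordered voters candidates := by
  rw [ranked_choice_voting, ranked_choice_voting_alt]
  have hlen : (PySem.List.pyRange 1 (candidates + 1) 1).length = candidates.toNat := by
    rw [PySem.List.length_pyRange_one]
    omega
  have hnd : (PySem.List.pyRange 1 (candidates + 1) 1).Nodup := PySem.List.nodup_pyRange_one 1 (candidates + 1)
  have hb : ∀ c ∈ PySem.List.pyRange 1 (candidates + 1) 1, 1 ≤ c ∧ c ≤ candidates := by
    intro c hc
    rw [PySem.List.mem_pyRange_one] at hc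
    omega
  obtain ⟨h1, h2⟩ := pvLoop_eq (candidateRanking.zip ordered) candidates hC
    (candidates.toNat - 1) (PySem.List.pyRange 1 (candidates + 1) 1)
    (pvM (candidateRanking.zip ordered) candidates) [] (PySem.List.pyRange 1 (candidates + 1) 1).length
    hnd hb (by omega) (by omega) (fun A' _ => rfl)
  rw [pvChi_init] at h1 h2
  have hn : (candidates - 1).toNat = candidates.toNat - 1 := by omega
  rw [Prod.mk.injEq]
  rw [hn]
  exact ⟨h1, h2⟩

-- ===== VERDICT (by name: the statement is the Claim_ definition above) =====
theorem ranked_choice_voting_spec : Claim_equal_ranked_choice_voting := by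
  intro candidateRanking ordered voters candidates _ hpre
  show ranked_choice_voting candidateRanking ordered voters candidates
      = ranked_choice_voting_alt candidateRanking ordered voters candidates
  exact pv_main candidateRanking ordered voters candidates hpre
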